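-- pv_equiv track=rewrite | github.com/Pixelatory/HybridFragmentTokenization | DeepFMPO/build_vocab.py | convert_encoding_to_tokens
-- ===== SOURCE A (Python) =====
-- def convert_encoding_to_tokens(encoded_smi, model_num2str, smiles_num2str, frag_num2str):
--     res = []
--     for num in encoded_smi:
--         num = int(num)
--         if num in model_num2str:
--             res.append(model_num2str[num])
--         elif num in frag_num2str:
--             res.append(frag_num2str[num])
--         elif num in smiles_num2str:
--             res.append(smiles_num2str[num])
--         else:
--             raise Exception(f"Unknown encoding value: {num}")
--     return res
-- ===== SOURCE B (Python) =====
-- def convert_encoding_to_tokens(encoded_smi, model_num2str, smiles_num2str, frag_num2str):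
--     # columnwise staged passes: map everything through the model dict first,
--     # then fill the holes from frag, then from smiles, then validate.
--     keys = [int(num) for num in encoded_smi]
--     res = [model_num2str.get(k) for k in keys]
--     res = [frag_num2str.get(k) if t is None else t for t, k in zip(res, keys)]
--     res = [smiles_num2str.get(k) if t is None else t for t, k in zip(res, keys)]
--     for t, k in zip(res, keys):
--         if t is None:
--             raise Exception(f"Unknown encoding value: {k}")
--     return res
-- ===== Notes on version B (the rewrite author's own statement) =====
-- stated objective: alternative
-- what changed: A resolves each element with a per-element elif chain over the three dicts; B works columnwise in staged passes: one pass mapping every encoding through the model dict into an Option-like column, two fill-in passes patching the remaining holes from frag and then smiles, and a final validation pass that raises on any hole.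
import Mathlib
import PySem

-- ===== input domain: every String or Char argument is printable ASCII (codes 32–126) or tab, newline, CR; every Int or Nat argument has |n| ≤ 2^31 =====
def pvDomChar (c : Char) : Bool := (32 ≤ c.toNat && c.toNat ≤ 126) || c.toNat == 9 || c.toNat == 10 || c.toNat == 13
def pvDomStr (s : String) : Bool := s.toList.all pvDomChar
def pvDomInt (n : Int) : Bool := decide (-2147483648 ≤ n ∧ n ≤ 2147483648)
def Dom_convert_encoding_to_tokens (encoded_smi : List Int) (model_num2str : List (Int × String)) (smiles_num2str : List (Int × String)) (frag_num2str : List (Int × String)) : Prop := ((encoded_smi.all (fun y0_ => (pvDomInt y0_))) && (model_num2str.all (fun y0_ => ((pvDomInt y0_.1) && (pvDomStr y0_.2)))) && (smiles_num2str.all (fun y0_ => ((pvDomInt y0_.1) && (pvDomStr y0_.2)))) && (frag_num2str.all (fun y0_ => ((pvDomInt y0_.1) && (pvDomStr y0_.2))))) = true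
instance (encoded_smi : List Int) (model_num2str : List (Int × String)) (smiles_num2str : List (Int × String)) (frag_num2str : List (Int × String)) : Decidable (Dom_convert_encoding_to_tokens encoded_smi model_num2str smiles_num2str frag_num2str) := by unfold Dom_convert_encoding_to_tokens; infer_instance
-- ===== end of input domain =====

-- B replaces A's per-element elif chain by columnwise staged passes (model pass, two
-- fill-in passes, validation pass); objective: alternative decomposition, same cost.

-- ===== PORT A =====
-- A's per-element elif chain: model, then frag, then smiles; the final else RAISES in
-- Python (excluded by Pre_), here the element is skipped (unreachable under Pre_).
def pvStepA (model_num2str : List (Int × String)) (smiles_num2str : List (Int × String)) (frag_num2str : List (Int × String)) (res : List String) (num : Int) : List String :=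
  match (PySem.Dict.mk model_num2str).get? num with
  | some s => res ++ [s]
  | none =>
    match (PySem.Dict.mk frag_num2str).get? num with
    | some s => res ++ [s]
    | none =>
      match (PySem.Dict.mk smiles_num2str).get? num with
      | some s => res ++ [s]
      | none => res   -- Python: raise Exception(f"Unknown encoding value: {num}")

def convert_encoding_to_tokens (encoded_smi : List Int) (model_num2str : List (Int × String)) (smiles_num2str : List (Int × String)) (frag_num2str : List (Int × String)) : List String :=
  encoded_smi.foldl (pvStepA model_num2str smiles_num2str frag_num2str) []

-- ===== PORT B =====
-- Source B, pass for pass: keys; model pass; frag fill-in pass; smiles fill-in pass;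
-- the validation loop only raises on a remaining None (unreachable under Pre_),
-- so returning unwraps the Options (the "" default is never used under Pre_).
def convert_encoding_to_tokens_alt (encoded_smi : List Int) (model_num2str : List (Int × String)) (smiles_num2str : List (Int × String)) (frag_num2str : List (Int × String)) : List String :=
  let keys := encoded_smi.map (fun num => num)          -- [int(num) for num in encoded_smi]
  let res1 := keys.map (fun k => (PySem.Dict.mk model_num2str).get? k)
  let res2 := (res1.zip keys).map (fun p => match p.1 with
    | none => (PySem.Dict.mk frag_num2str).get? p.2
    | some t => some t)
  let res3 := (res2.zip keys).map (fun p => match p.1 with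
    | none => (PySem.Dict.mk smiles_num2str).get? p.2
    | some t => some t)
  res3.map (fun t => t.getD "")

-- ===== PRECONDITION & SPEC =====
-- Pre_ excludes exactly the inputs on which A raises Exception("Unknown encoding value: …"):
-- some encoding present in none of the three maps (B raises the same there).
def Pre_convert_encoding_to_tokens (encoded_smi : List Int) (model_num2str : List (Int × String)) (smiles_num2str : List (Int × String)) (frag_num2str : List (Int × String)) : Prop :=
  ∀ num ∈ encoded_smi, num ∈ model_num2str.map (·.1) ∨ num ∈ frag_num2str.map (·.1) ∨ num ∈ smiles_num2str.map (·.1)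
instance (encoded_smi : List Int) (model_num2str : List (Int × String)) (smiles_num2str : List (Int × String)) (frag_num2str : List (Int × String)) : Decidable (Pre_convert_encoding_to_tokens encoded_smi model_num2str smiles_num2str frag_num2str) := by unfold Pre_convert_encoding_to_tokens; infer_instance

def pvWitness_convert_encoding_to_tokens : List Int × (List (Int × String)) × (List (Int × String)) × (List (Int × String)) :=
  ([1, 2, 3], [(1, "M")], [(1, "S"), (2, "s")], [(2, "F"), (3, "f")])

def Spec_convert_encoding_to_tokens (encoded_smi : List Int) (model_num2str : List (Int × String)) (smiles_num2str : List (Int × String)) (frag_num2str : List (Int × String)) (out : List String) : Prop := out = convert_encoding_to_tokens_alt encoded_smi model_num2str smiles_num2str frag_num2str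
instance (encoded_smi : List Int) (model_num2str : List (Int × String)) (smiles_num2str : List (Int × String)) (frag_num2str : List (Int × String)) (out : List String) : Decidable (Spec_convert_encoding_to_tokens encoded_smi model_num2str smiles_num2str frag_num2str out) := by unfold Spec_convert_encoding_to_tokens; infer_instance

-- ===== CLAIM =====
def Claim_equal_convert_encoding_to_tokens : Prop := ∀ (encoded_smi : List Int) (model_num2str : List (Int × String)) (smiles_num2str : List (Int × String)) (frag_num2str : List (Int × String)), Dom_convert_encoding_to_tokens encoded_smi model_num2str smiles_num2str frag_num2str → Pre_convert_encoding_to_tokens encoded_smi model_num2str smiles_num2str frag_num2str → Spec_convert_encoding_to_tokens encoded_smi model_num2str smiles_num2str frag_num2str (convert_encoding_to_tokens encoded_smi model_num2str smiles_num2str frag_num2str)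

-- ===== LEMMAS AND PROOFS =====

-- zipping a mapped copy of a list with the list itself is a single map
theorem pv_zip_map_self {α β : Type} (f : α → β) (l : List α) :
    (l.map f).zip l = l.map (fun a => (f a, a)) := by
  induction l with
  | nil => rfl
  | cons a rest ih => simp [ih]

-- B's staged passes compute, elementwise, the or-chain of the three lookups
theorem pv_alt_eq_map (encoded_smi : List Int) (model_num2str smiles_num2str frag_num2str : List (Int × String)) :
    convert_encoding_to_tokens_alt encoded_smi model_num2str smiles_num2str frag_num2str
      = encoded_smi.map (fun k =>
          (((PySem.Dict.mk model_num2str).get? k).or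
            (((PySem.Dict.mk frag_num2str).get? k).or ((PySem.Dict.mk smiles_num2str).get? k))).getD "") := by
  unfold convert_encoding_to_tokens_alt
  simp only [List.map_id']
  rw [pv_zip_map_self]
  simp only [List.map_map]
  rw [pv_zip_map_self]
  simp only [List.map_map]
  refine List.map_congr_left (fun k _ => ?_)
  simp only [Function.comp]
  rcases (PySem.Dict.mk model_num2str).get? k with _ | t
  · rcases (PySem.Dict.mk frag_num2str).get? k with _ | t <;> simp [Option.or]
  · simp [Option.or]

theorem pv_mem_keys_get? (l : List (Int × String)) (k : Int) (h : k ∈ l.map (·.1)) :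
    ∃ v, (PySem.Dict.mk l).get? k = some v := by
  rcases Option.eq_none_or_eq_some ((PySem.Dict.mk l).get? k) with h0 | h0
  · rw [PySem.Dict.get?_eq_none_iff_not_mem_keys] at h0
    exact absurd (by simpa [PySem.Dict.keys] using h) h0
  · exact ⟨_, h0.choose_spec⟩

-- A's fold appends, per element, exactly that or-chain, given every encoding is found
theorem pv_foldl_eq_map (model_num2str smiles_num2str frag_num2str : List (Int × String))
    (l : List Int) (res : List String)
    (hall : ∀ num ∈ l, num ∈ model_num2str.map (·.1) ∨ num ∈ frag_num2str.map (·.1) ∨ num ∈ smiles_num2str.map (·.1)) :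
    l.foldl (pvStepA model_num2str smiles_num2str frag_num2str) res
      = res ++ l.map (fun k =>
          (((PySem.Dict.mk model_num2str).get? k).or
            (((PySem.Dict.mk frag_num2str).get? k).or ((PySem.Dict.mk smiles_num2str).get? k))).getD "") := by
  induction l generalizing res with
  | nil => simp
  | cons num rest ih =>
    have hstep : pvStepA model_num2str smiles_num2str frag_num2str res num
        = res ++ [(((PySem.Dict.mk model_num2str).get? num).or
            (((PySem.Dict.mk frag_num2str).get? num).or ((PySem.Dict.mk smiles_num2str).get? num))).getD ""] := by
      rcases hall num (List.mem_cons_self ..) with hin | hin | hin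
      · obtain ⟨v, hv⟩ := pv_mem_keys_get? _ _ hin
        rw [pvStepA, hv]; simp [Option.or]
      · obtain ⟨v, hv⟩ := pv_mem_keys_get? _ _ hin
        rcases Option.eq_none_or_eq_some ((PySem.Dict.mk model_num2str).get? num) with h0 | ⟨w, h0⟩
        · rw [pvStepA, h0, hv]; simp [Option.or]
        · rw [pvStepA, h0]; simp [Option.or]
      · obtain ⟨v, hv⟩ := pv_mem_keys_get? _ _ hin
        rcases Option.eq_none_or_eq_some ((PySem.Dict.mk model_num2str).get? num) with h0 | ⟨w, h0⟩
        · rcases Option.eq_none_or_eq_some ((PySem.Dict.mk frag_num2str).get? num) with h1 | ⟨w1, h1⟩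
          · rw [pvStepA, h0, h1, hv]; simp [Option.or]
          · rw [pvStepA, h0, h1]; simp [Option.or]
        · rw [pvStepA, h0]; simp [Option.or]
    rw [List.foldl_cons, hstep, ih _ (fun x hx => hall x (List.mem_cons_of_mem _ hx))]
    simp

-- ===== VERDICT =====
theorem convert_encoding_to_tokens_spec : Claim_equal_convert_encoding_to_tokens := by
  intro encoded_smi model_num2str smiles_num2str frag_num2str _ hpre
  unfold Spec_convert_encoding_to_tokens convert_encoding_to_tokens
  rw [pv_alt_eq_map]
  simpa using pv_foldl_eq_map model_num2str smiles_num2str frag_num2str encoded_smi [] hpre
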